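-- pv_equiv track=rewrite | github.com/kojioku/abmptools | ampt/abinit_io.py | get_fragsection
-- ===== SOURCE A (Python) =====
-- def get_fragsection(param):
--     frag_atom, frag_charge, frag_connect_num, frag_connect, seg_info = param
--
--     ajf_fragment = ''
--     # fragment atom
--     for i in range(len(frag_atom)):
--         icount = 0
--         for j in range(len(frag_atom[i])):
--             icount += 1
--             ajf_fragment += '%8d' % (frag_atom[i][j])
--             if icount % 10 is 0:
--                 icount = 0
--                 ajf_fragment += '\n'
--         if icount % 10 != 0:
--             ajf_fragment += '\n'
--
--     # fragment charge
--     for i in range(len(frag_charge)):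
--         icount = 0
--         for j in range(len(frag_charge[i])):
--             icount += 1
--             ajf_fragment += '%8d' % (frag_charge[i][j])
--             if icount % 10 is 0:
--                 icount = 0
--                 ajf_fragment += '\n'
--         if icount % 10 != 0:
--             ajf_fragment += '\n'
--
--     # fragment connect num
--     for i in range(len(frag_connect_num)):
--         icount = 0
--         for j in range(len(frag_connect_num[i])):
--             icount += 1
--             ajf_fragment += '%8d' % (frag_connect_num[i][j])
--             if icount % 10 is 0:
--                 icount = 0
--                 ajf_fragment += '\n'
--         if icount % 10 != 0:
--             ajf_fragment += '\n'
--
--     # fragment body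
--     atom_count = 0
--     for i in range(len(seg_info)):
--         for j in range(len(seg_info[i])):
--             icount = 0
--             for k in range(len(seg_info[i][j])):
--                 icount += 1
--                 ajf_fragment += '%8d' % (seg_info[i][j][k] + atom_count)
--                 if icount % 10 is 0:
--                     icount = 0
--                     ajf_fragment += '\n'
--             if icount % 10 != 0:
--                 ajf_fragment += '\n'
--         atom_count += sum(frag_atom[0])
--
--     atom_count = 0
--     # connect info
--     for i in range(len(frag_connect)):
--         for j in range(len(frag_connect[i])):
--             ajf_fragment += '%8d' % (frag_connect[i][j][0] + atom_count)
--             ajf_fragment += '%8d' % (frag_connect[i][j][1] + atom_count)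
--             ajf_fragment += '\n'
--         atom_count += sum(frag_atom[0])
--     return ajf_fragment
-- ===== SOURCE B (Python) =====
-- def get_fragsection(param):
--     frag_atom, frag_charge, frag_connect_num, frag_connect, seg_info = param
--
--     def block(rows, offset=0):
--         # one 2D block: each row in chunks of 10 fields, one newline per chunk
--         return [''.join('%8d' % (v + offset) for v in row[c:c + 10]) + '\n'
--                 for row in rows
--                 for c in range(0, len(row), 10)]
--
--     out = []
--     for rows in (frag_atom, frag_charge, frag_connect_num):
--         out += block(rows)
--     for g, group in enumerate(seg_info):
--         out += block(group, g * sum(frag_atom[0]))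
--     for g, group in enumerate(frag_connect):
--         off = g * sum(frag_atom[0])
--         out += ['%8d%8d\n' % (pair[0] + off, pair[1] + off) for pair in group]
--     return ''.join(out)
-- ===== Notes on version B (the rewrite author's own statement) =====
-- stated objective: simpler
-- what changed: A's three copy-pasted icount/mod-10 accumulator loops and the seg_info/connect accumulator threading are replaced by one chunk-slicing block formatter (row[c:c+10] lines) reused for every section, with offsets computed as g*sum(frag_atom[0]) via enumerate instead of a running counter, collected in a list and joined once.
-- outside the precondition, e.g. on get_fragsection(([], [], [], [[[1, 2]]], [])): A raises IndexError, B raises IndexError; on get_fragsection(([[1]], [], [], [[[1]]], [])): A raises IndexError, B raises IndexError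
import Mathlib
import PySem

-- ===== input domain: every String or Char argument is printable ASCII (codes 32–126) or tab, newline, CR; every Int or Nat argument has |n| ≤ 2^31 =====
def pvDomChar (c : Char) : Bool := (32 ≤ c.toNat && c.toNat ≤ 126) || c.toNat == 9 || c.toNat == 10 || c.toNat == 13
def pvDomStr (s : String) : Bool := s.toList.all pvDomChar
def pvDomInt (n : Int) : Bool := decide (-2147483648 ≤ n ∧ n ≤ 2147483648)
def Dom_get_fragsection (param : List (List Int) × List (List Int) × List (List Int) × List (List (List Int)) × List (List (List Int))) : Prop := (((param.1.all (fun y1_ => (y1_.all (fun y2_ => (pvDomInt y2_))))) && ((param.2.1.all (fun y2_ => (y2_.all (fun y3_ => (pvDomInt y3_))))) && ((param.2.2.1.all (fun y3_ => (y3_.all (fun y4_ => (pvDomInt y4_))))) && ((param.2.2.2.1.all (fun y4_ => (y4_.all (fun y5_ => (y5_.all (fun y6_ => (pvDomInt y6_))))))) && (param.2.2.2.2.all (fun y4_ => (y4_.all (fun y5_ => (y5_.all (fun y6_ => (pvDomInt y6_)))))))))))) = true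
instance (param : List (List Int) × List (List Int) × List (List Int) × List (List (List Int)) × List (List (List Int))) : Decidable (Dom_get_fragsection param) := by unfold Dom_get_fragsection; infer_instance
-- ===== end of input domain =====

-- B replaces A's three copy-pasted icount/mod-10 accumulator loops by one chunk-slicing block
-- formatter reused for every section (objective: simpler); return values proved equal on Pre_.

-- '%8d' % n : str(n) right-justified to width 8 with spaces (shared low-level primitive of both ports)
def fmt8 (n : Int) : String :=
  String.ofList (List.replicate (8 - (PySem.Int.toChars n).length) ' ' ++ PySem.Int.toChars n)

-- ===== PORT A =====
-- one step of A's inner loop: icount += 1; append field; reset + newline at every 10th field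
def stepA (off : Int) (st : Int × String) (v : Int) : Int × String :=
  let ic := st.1 + 1
  let s := st.2 ++ fmt8 (v + off)
  if PySem.Int.mod ic 10 = 0 then (0, s ++ "\n") else (ic, s)

-- A's inner j-loop over one row plus the trailing 'if icount % 10 != 0' newline
def pyA_row (off : Int) (acc : String) (row : List Int) : String :=
  let st := row.foldl (stepA off) (0, acc)
  if PySem.Int.mod st.1 10 ≠ 0 then st.2 ++ "\n" else st.2

-- A's outer i-loop over one 2D block (A repeats this code three times verbatim)
def pyA_block (off : Int) (acc : String) (rows : List (List Int)) : String :=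
  rows.foldl (pyA_row off) acc

def get_fragsection (param : List (List Int) × List (List Int) × List (List Int) × List (List (List Int)) × List (List (List Int))) : String :=
  match param with
  | (frag_atom, frag_charge, frag_connect_num, frag_connect, seg_info) =>
    let s := pyA_block 0 "" frag_atom
    let s := pyA_block 0 s frag_charge
    let s := pyA_block 0 s frag_connect_num
    -- fragment body: atom_count starts at 0, grows by sum(frag_atom[0]) after each group
    -- (frag_atom[0] raises on empty frag_atom: excluded by Pre_; headD [] is exact under Pre_)
    let st := seg_info.foldl
      (fun (st : String × Int) group =>
        (pyA_block st.2 st.1 group, st.2 + (frag_atom.headD []).sum)) (s, 0)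
    -- connect info: pair[0], pair[1] raise on pairs shorter than 2: excluded by Pre_
    let st2 := frag_connect.foldl
      (fun (st : String × Int) group =>
        (group.foldl
          (fun s2 pair =>
            s2 ++ fmt8 (pair.getD 0 0 + st.2) ++ fmt8 (pair.getD 1 0 + st.2) ++ "\n") st.1,
         st.2 + (frag_atom.headD []).sum)) (st.1, 0)
    st2.1

-- ===== PORT B =====
-- Source B's block(): per row, one line per slice row[c:c+10] for c in range(0, len(row), 10)
def bBlockLines (rows : List (List Int)) (off : Int) : List String :=
  rows.flatMap (fun row =>
    (PySem.List.pyRange 0 (row.length : Int) 10).map (fun c =>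
      PySem.Str.join "" ((PySem.List.slice row (some c) (some (c + 10))).map
        (fun v => fmt8 (v + off))) ++ "\n"))

def get_fragsection_alt (param : List (List Int) × List (List Int) × List (List Int) × List (List (List Int)) × List (List (List Int))) : String :=
  match param with
  | (frag_atom, frag_charge, frag_connect_num, frag_connect, seg_info) =>
    let out : List String :=
      bBlockLines frag_atom 0 ++ bBlockLines frag_charge 0 ++ bBlockLines frag_connect_num 0
      ++ (PySem.List.enumerate seg_info 0).flatMap
           (fun gi => bBlockLines gi.2 (gi.1 * (frag_atom.headD []).sum))
      ++ (PySem.List.enumerate frag_connect 0).flatMap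
           (fun gi => gi.2.map (fun pair =>
              fmt8 (pair.getD 0 0 + gi.1 * (frag_atom.headD []).sum)
                ++ fmt8 (pair.getD 1 0 + gi.1 * (frag_atom.headD []).sum) ++ "\n"))
    PySem.Str.join "" out

-- ===== PRECONDITION & SPEC =====
-- Pre_ excludes exactly the inputs where A raises IndexError: frag_atom[0] with empty frag_atom
-- (reached as soon as seg_info or frag_connect is nonempty) and connect pairs shorter than 2.
def Pre_get_fragsection (param : List (List Int) × List (List Int) × List (List Int) × List (List (List Int)) × List (List (List Int))) : Prop :=
  ((param.2.2.2.1 ≠ [] ∨ param.2.2.2.2 ≠ []) → param.1 ≠ []) ∧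
  (∀ group ∈ param.2.2.2.1, ∀ pair ∈ group, 2 ≤ pair.length)
instance (param : List (List Int) × List (List Int) × List (List Int) × List (List (List Int)) × List (List (List Int))) : Decidable (Pre_get_fragsection param) := by unfold Pre_get_fragsection; infer_instance

def pvWitness_get_fragsection : (List (List Int) × List (List Int) × List (List Int) × List (List (List Int)) × List (List (List Int))) :=
  ([[1, 2]], [[0]], [[1]], [[[1, 2]]], [[[1, 2]]])

def Spec_get_fragsection (param : List (List Int) × List (List Int) × List (List Int) × List (List (List Int)) × List (List (List Int))) (out : String) : Prop := out = get_fragsection_alt param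
instance (param : List (List Int) × List (List Int) × List (List Int) × List (List (List Int)) × List (List (List Int))) (out : String) : Decidable (Spec_get_fragsection param out) := by unfold Spec_get_fragsection; infer_instance

-- ===== CLAIM (what is proved, stated in full; the proofs are below) =====
def Claim_equal_get_fragsection : Prop := ∀ (param : List (List Int) × List (List Int) × List (List Int) × List (List (List Int)) × List (List (List Int))), Dom_get_fragsection param → Pre_get_fragsection param → Spec_get_fragsection param (get_fragsection param)

-- ===== LEMMAS AND PROOFS =====

theorem mod10 (ic : Int) : PySem.Int.mod ic 10 = ic % 10 := by
  simp [PySem.Int.mod, Int.fmod_eq_emod]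

-- flattening and concatenation facts for ''.join
theorem flatten_intersperse_nil {α : Type} (l : List (List α)) :
    (List.intersperse ([] : List α) l).flatten = l.flatten := by
  induction l with
  | nil => simp
  | cons a t ih => cases t <;> simp_all [List.intersperse]

theorem join_nil : PySem.Str.join "" ([] : List String) = "" := by
  apply String.toList_inj.mp
  simp [PySem.Str.join, PySem.Chars.join, List.intercalate]

theorem join_cons (x : String) (l : List String) :
    PySem.Str.join "" (x :: l) = x ++ PySem.Str.join "" l := by
  apply String.toList_inj.mp
  simp [PySem.Str.join, PySem.Chars.join, List.intercalate, flatten_intersperse_nil]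

theorem join_append (a b : List String) :
    PySem.Str.join "" (a ++ b) = PySem.Str.join "" a ++ PySem.Str.join "" b := by
  apply String.toList_inj.mp
  simp [PySem.Str.join, PySem.Chars.join, List.intercalate, flatten_intersperse_nil]

-- canonical rendering: each row split into chunks of 10, one line per chunk
def Jline (off : Int) (c : List Int) : String :=
  PySem.Str.join "" (c.map (fun v => fmt8 (v + off)))

def chunks : List Int → List (List Int)
  | [] => []
  | x :: xs => (x :: xs).take 10 :: chunks ((x :: xs).drop 10)
termination_by l => l.length
decreasing_by simp

def render (off : Int) (cs : List (List Int)) : String :=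
  PySem.Str.join "" (cs.map (fun c => Jline off c ++ "\n"))

theorem chunks_nil : chunks [] = [] := by rw [chunks]

theorem chunks_cons (row : List Int) (h : row ≠ []) :
    chunks row = row.take 10 :: chunks (row.drop 10) := by
  cases row with
  | nil => exact absurd rfl h
  | cons x xs => rw [chunks]

theorem Jline_cons (off v : Int) (c : List Int) :
    Jline off (v :: c) = fmt8 (v + off) ++ Jline off c := by
  simp [Jline, join_cons]

-- A's inner loop over (a suffix of) one chunk: counter grows, string grows, reset exactly at 10
theorem foldA_small (off : Int) : ∀ (c : List Int) (ic : Int) (acc : String),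
    0 ≤ ic → ic + c.length ≤ 10 →
    c.foldl (stepA off) (ic, acc) =
      if ic + c.length = 10 ∧ c ≠ [] then (0, acc ++ Jline off c ++ "\n")
      else (ic + c.length, acc ++ Jline off c) := by
  intro c
  induction c with
  | nil =>
    intro ic acc h0 h10
    simp [Jline, join_nil, String.append_empty]
  | cons v t ih =>
    intro ic acc h0 h10
    simp only [List.foldl_cons]
    have hmod : PySem.Int.mod (ic + 1) 10 = 0 ↔ ic + 1 = 10 := by
      simp only [List.length_cons] at h10
      rw [mod10]
      omega
    by_cases h : ic + 1 = 10
    · have ht : t = [] := by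
        simp only [List.length_cons] at h10
        have := List.length_eq_zero_iff.mp (show t.length = 0 by omega)
        exact this
      subst ht
      simp only [stepA, hmod.mpr h, if_pos rfl]
      simp only [List.foldl_nil]
      have hj : Jline off [v] = fmt8 (v + off) := by
        rw [Jline_cons]; simp [Jline, join_nil, String.append_empty]
      simp only [List.length_cons, List.length_nil]
      have hcd : ic + (((0 + 1 : Nat)) : Int) = 10 ∧ ([v] : List Int) ≠ [] :=
        ⟨by push_cast; omega, by simp⟩
      rw [if_pos hcd, hj]
      simp
    · have hne : ¬ PySem.Int.mod (ic + 1) 10 = 0 := fun hc => h (hmod.mp hc)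
      simp only [stepA, hne, if_neg, ite_false]
      rw [ih (ic + 1) (acc ++ fmt8 (v + off)) (by omega)
        (by simp only [List.length_cons] at h10; omega)]
      simp only [List.length_cons]
      have harith : ic + 1 + (t.length : Int) = ic + ((t.length : Int) + 1) := by ring
      by_cases hfull : ic + ((t.length : Int) + 1) = 10
      · have htne : t ≠ [] := by
          intro hnil; subst hnil; simp at hfull; omega
        simp [harith, hfull, htne, Jline_cons, String.append_assoc]
      · have : ¬ (ic + 1 + (t.length : Int) = 10 ∧ t ≠ []) := by
          intro ⟨h1, _⟩; exact hfull (by omega)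
        simp [this, harith, hfull, Jline_cons, String.append_assoc]

-- A's whole row (inner loop + trailing-newline fixup) renders the row's chunks
theorem A_row_eq : ∀ (n : Nat) (row : List Int), row.length ≤ n → ∀ (off : Int) (acc : String),
    pyA_row off acc row = acc ++ render off (chunks row) := by
  intro n
  induction n with
  | zero =>
    intro row hlen off acc
    have : row = [] := List.length_eq_zero_iff.mp (Nat.le_zero.mp hlen)
    subst this
    simp [pyA_row, chunks_nil, render, join_nil, String.append_empty, mod10]
  | succ m ih =>
    intro row hlen off acc
    cases hrow : row with
    | nil =>
      simp [pyA_row, chunks_nil, render, join_nil, String.append_empty, mod10]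
    | cons x xs =>
      subst hrow
      by_cases hsmall : (x :: xs).length ≤ 10
      · -- one (possibly partial) chunk
        unfold pyA_row
        rw [foldA_small off _ 0 acc (le_refl 0) (by
          have hs := hsmall
          simp only [List.length_cons] at hs ⊢
          push_cast
          omega)]
        have hne : (x :: xs) ≠ [] := by simp
        rw [chunks_cons _ hne]
        have htake : (x :: xs).take 10 = x :: xs := List.take_of_length_le hsmall
        have hdrop : (x :: xs).drop 10 = [] := List.drop_eq_nil_of_le hsmall
        rw [htake, hdrop, chunks_nil]
        by_cases hfull : (0 : Int) + ((x :: xs).length : Int) = 10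
        · rw [if_pos (show (0 : Int) + ((x :: xs).length : Int) = 10 ∧ (x :: xs) ≠ [] from
            ⟨hfull, hne⟩)]
          simp only [mod10]
          norm_num
          simp only [render, List.map_cons, List.map_nil, join_cons, join_nil,
            String.append_empty, String.append_assoc]
        · rw [if_neg (show ¬((0 : Int) + ((x :: xs).length : Int) = 10 ∧ (x :: xs) ≠ []) from
            fun hc => hfull hc.1)]
          simp only [mod10]
          rw [if_pos (show ((0 : Int) + ((x :: xs).length : Int)) % 10 ≠ 0 from by
            have hs := hsmall
            have hf := hfull
            simp only [List.length_cons] at hs hf ⊢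
            push_cast at hs hf ⊢
            omega)]
          simp only [render, List.map_cons, List.map_nil, join_cons, join_nil,
            String.append_empty, String.append_assoc]
      · -- full leading chunk of 10, then recurse on the rest
        have hsplit : (x :: xs) = (x :: xs).take 10 ++ (x :: xs).drop 10 :=
          (List.take_append_drop 10 (x :: xs)).symm
        have hbig : 10 < (x :: xs).length := Nat.lt_of_not_le hsmall
        have hlen10 : ((x :: xs).take 10).length = 10 := by
          rw [List.length_take]; omega
        have htne : (x :: xs).take 10 ≠ [] := by
          intro hc; rw [hc] at hlen10; simp at hlen10
        unfold pyA_row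
        conv_lhs => rw [hsplit]
        rw [List.foldl_append]
        rw [foldA_small off _ 0 acc (le_refl 0) (by rw [hlen10]; norm_num)]
        have hcond : (0 : Int) + (((x :: xs).take 10).length : Int) = 10 ∧ (x :: xs).take 10 ≠ [] := by
          constructor
          · rw [hlen10]; norm_num
          · exact htne
        rw [if_pos hcond]
        have hrest : ((x :: xs).drop 10).length ≤ m := by
          rw [List.length_drop]; omega
        have := ih ((x :: xs).drop 10) hrest off
          (acc ++ Jline off ((x :: xs).take 10) ++ "\n")
        unfold pyA_row at this
        rw [chunks_cons (x :: xs) (by simp), this]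
        simp only [render, List.map_cons, join_cons, String.append_assoc]

-- range(0, n, 10) unrolls one step at a time
theorem pyRange_ten_nil : PySem.List.pyRange 0 ((0 : Nat) : Int) 10 = [] := by
  rw [PySem.List.pyRange_of_pos _ _ (by norm_num)]
  norm_num

theorem range_shift (X : Nat) (f : Nat → Int) (hf : ∀ k, f (k + 1) = f k + 10) :
    List.map f (List.range (X + 1)) = f 0 :: List.map (· + 10) (List.map f (List.range X)) := by
  rw [List.range_succ_eq_map, List.map_cons, List.map_map, List.map_map]
  refine List.cons_eq_cons.mpr ⟨rfl, ?_⟩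
  apply List.map_congr_left
  intro k hk
  simp only [Function.comp_apply, Nat.succ_eq_add_one, hf]

theorem pyRange_ten_cons (n : Nat) (hn : 0 < n) :
    PySem.List.pyRange 0 ((n : Nat) : Int) 10 =
      0 :: (PySem.List.pyRange 0 (((n : Nat) : Int) - 10) 10).map (· + 10) := by
  rw [PySem.List.pyRange_of_pos _ _ (by norm_num : (0:Int) < 10),
      PySem.List.pyRange_of_pos _ _ (by norm_num : (0:Int) < 10)]
  have hq : ((((n : Nat) : Int) - 0 + 10 - 1) / 10).toNat =
      (if (0 : Int) < ((n : Nat) : Int) - 10 then ((((n : Nat) : Int) - 10 - 0 + 10 - 1) / 10).toNat else 0) + 1 := by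
    by_cases h : (0 : Int) < ((n : Nat) : Int) - 10
    · rw [if_pos h]
      have : ((n : Int) + 9) / 10 = ((n : Int) - 1) / 10 + 1 := by
        have : ((n : Int) - 1 + 1 * 10) / 10 = ((n : Int) - 1) / 10 + 1 :=
          Int.add_mul_ediv_right _ _ (by norm_num)
        omega
      omega
    · rw [if_neg h]
      have h1 : ((n : Int) + 9) / 10 = 1 := by omega
      omega
  rw [if_pos (by push_cast; omega : (0:Int) < ((n : Nat) : Int)), hq,
      range_shift _ _ (by intro k; push_cast; ring)]
  norm_num

-- a shifted slice of the row is a slice of the dropped row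
theorem slice_shift (row : List Int) (c : Int) (hc : 0 ≤ c) :
    PySem.List.slice row (some (c + 10)) (some (c + 10 + 10)) =
      PySem.List.slice (row.drop 10) (some c) (some (c + 10)) := by
  rw [PySem.List.slice_toNat _ (by omega) (by omega),
      PySem.List.slice_toNat _ hc (by omega)]
  have h2 : (c + 10 + 10).toNat - (c + 10).toNat = 10 := by omega
  have h3 : (c + 10).toNat - c.toNat = 10 := by omega
  rw [h2, h3]
  have h1 : (c + 10).toNat = c.toNat + 10 := by omega
  rw [h1]
  simp only [List.drop_drop]
  congr 2
  omega

-- B's per-row chunk lines join to the same canonical rendering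
theorem B_row_eq : ∀ (n : Nat) (row : List Int), row.length ≤ n → ∀ (off : Int),
    PySem.Str.join "" ((PySem.List.pyRange 0 (row.length : Int) 10).map (fun c =>
      PySem.Str.join "" ((PySem.List.slice row (some c) (some (c + 10))).map
        (fun v => fmt8 (v + off))) ++ "\n")) = render off (chunks row) := by
  intro n
  induction n with
  | zero =>
    intro row hlen off
    have : row = [] := List.length_eq_zero_iff.mp (Nat.le_zero.mp hlen)
    subst this
    simp only [List.length_nil]
    rw [pyRange_ten_nil]
    simp [render, chunks, join_nil]
  | succ m ih =>
    intro row hlen off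
    cases hrow : row with
    | nil =>
      simp only [List.length_nil]
      rw [pyRange_ten_nil]
      simp [render, chunks, join_nil]
    | cons x xs =>
      subst hrow
      rw [pyRange_ten_cons _ (by simp)]
      rw [List.map_cons, join_cons, List.map_map]
      have hhead : PySem.List.slice (x :: xs) (some 0) (some (0 + 10)) = (x :: xs).take 10 := by
        rw [PySem.List.slice_toNat _ (le_refl 0) (by norm_num)]
        norm_num
        simp
      have htail : ((PySem.List.pyRange 0 (((x :: xs).length : Int) - 10) 10).map
          ((fun c => PySem.Str.join "" ((PySem.List.slice (x :: xs) (some c) (some (c + 10))).map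
            (fun v => fmt8 (v + off))) ++ "\n") ∘ (· + 10))) =
          (PySem.List.pyRange 0 ((((x :: xs).drop 10).length : Int)) 10).map (fun c =>
            PySem.Str.join "" ((PySem.List.slice ((x :: xs).drop 10) (some c) (some (c + 10))).map
              (fun v => fmt8 (v + off))) ++ "\n") := by
        by_cases h : 10 ≤ (x :: xs).length
        · have hlencast : (((x :: xs).drop 10).length : Int) = ((x :: xs).length : Int) - 10 := by
            rw [List.length_drop]; push_cast; omega
          rw [hlencast]
          apply List.map_congr_left
          intro c hc
          have hc0 : 0 ≤ c := ((PySem.List.mem_pyRange_iff_of_pos (by norm_num) c).mp hc).1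
          simp only [Function.comp_apply]
          rw [slice_shift _ c hc0]
        · have e1 : PySem.List.pyRange 0 (((x :: xs).length : Int) - 10) 10 = [] := by
            rw [PySem.List.pyRange_of_pos _ _ (by norm_num : (0:Int) < 10), if_neg (by omega)]
            simp
          have e2 : PySem.List.pyRange 0 ((((x :: xs).drop 10).length : Int)) 10 = [] := by
            have hz : ((x :: xs).drop 10).length = 0 := by rw [List.length_drop]; omega
            rw [hz, pyRange_ten_nil]
          rw [e1, e2]
          simp
      rw [htail, ih ((x :: xs).drop 10) (by rw [List.length_drop]; omega) off,
          chunks_cons (x :: xs) (by simp)]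
      simp only [render, List.map_cons, join_cons, hhead, Jline, String.append_assoc]

-- A's 2D-block loop = acc ++ ''.join(B's block lines)
theorem A_block_eq : ∀ (rows : List (List Int)) (off : Int) (acc : String),
    pyA_block off acc rows = acc ++ PySem.Str.join "" (bBlockLines rows off) := by
  intro rows
  induction rows with
  | nil => intro off acc; simp [pyA_block, bBlockLines, join_nil, String.append_empty]
  | cons r t ih =>
    intro off acc
    simp only [pyA_block, List.foldl_cons]
    have h1 : pyA_row off acc r = acc ++ render off (chunks r) :=
      A_row_eq r.length r (le_refl _) off acc
    have h2 : pyA_block off (pyA_row off acc r) t =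
        (pyA_row off acc r) ++ PySem.Str.join "" (bBlockLines t off) := ih off _
    show pyA_block off (pyA_row off acc r) t = _
    rw [h2, h1]
    simp only [bBlockLines, List.flatMap_cons]
    rw [join_append, B_row_eq r.length r (le_refl _) off]
    rw [String.append_assoc]

-- the seg_info loop: accumulator offset k*S, one block per group
theorem seg_eq : ∀ (seg : List (List (List Int))) (s : String) (k S : Int),
    (seg.foldl (fun (st : String × Int) group => (pyA_block st.2 st.1 group, st.2 + S)) (s, k * S)).1
      = s ++ PySem.Str.join "" ((PySem.List.enumerate seg k).flatMap
          (fun gi => bBlockLines gi.2 (gi.1 * S))) := by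
  intro seg
  induction seg with
  | nil => intro s k S; simp [PySem.List.enumerate, join_nil, String.append_empty]
  | cons g t ih =>
    intro s k S
    simp only [List.foldl_cons, PySem.List.enumerate, List.flatMap_cons]
    have hk : k * S + S = (k + 1) * S := by ring
    rw [hk, ih (pyA_block (k * S) s g) (k + 1) S]
    rw [A_block_eq g (k * S) s, join_append, String.append_assoc]

-- one connect group: per pair two fields and a newline
theorem conn_group_eq : ∀ (group : List (List Int)) (off : Int) (s : String),
    group.foldl (fun s2 pair =>
        s2 ++ fmt8 (pair.getD 0 0 + off) ++ fmt8 (pair.getD 1 0 + off) ++ "\n") s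
      = s ++ PySem.Str.join "" (group.map (fun pair =>
          fmt8 (pair.getD 0 0 + off) ++ fmt8 (pair.getD 1 0 + off) ++ "\n")) := by
  intro group
  induction group with
  | nil => intro off s; simp [join_nil, String.append_empty]
  | cons p t ih =>
    intro off s
    simp only [List.foldl_cons, List.map_cons, join_cons]
    rw [ih off]
    simp [String.append_assoc]

-- the connect loop: accumulator offset k*S, one group of pair lines per group
theorem conn_eq : ∀ (fconn : List (List (List Int))) (s : String) (k S : Int),
    (fconn.foldl (fun (st : String × Int) group =>
        (group.foldl (fun s2 pair =>
            s2 ++ fmt8 (pair.getD 0 0 + st.2) ++ fmt8 (pair.getD 1 0 + st.2) ++ "\n") st.1,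
         st.2 + S)) (s, k * S)).1
      = s ++ PySem.Str.join "" ((PySem.List.enumerate fconn k).flatMap
          (fun gi => gi.2.map (fun pair =>
            fmt8 (pair.getD 0 0 + gi.1 * S) ++ fmt8 (pair.getD 1 0 + gi.1 * S) ++ "\n"))) := by
  intro fconn
  induction fconn with
  | nil => intro s k S; simp [PySem.List.enumerate, join_nil, String.append_empty]
  | cons g t ih =>
    intro s k S
    simp only [List.foldl_cons, PySem.List.enumerate, List.flatMap_cons]
    have hk : k * S + S = (k + 1) * S := by ring
    rw [hk, ih _ (k + 1) S]
    rw [conn_group_eq g (k * S) s, join_append, String.append_assoc]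

theorem seg_eq0 (seg : List (List (List Int))) (s : String) (S : Int) :
    (seg.foldl (fun (st : String × Int) group => (pyA_block st.2 st.1 group, st.2 + S)) (s, 0)).1
      = s ++ PySem.Str.join "" ((PySem.List.enumerate seg 0).flatMap
          (fun gi => bBlockLines gi.2 (gi.1 * S))) := by
  have h := seg_eq seg s 0 S
  rw [zero_mul] at h
  exact h

theorem conn_eq0 (fconn : List (List (List Int))) (s : String) (S : Int) :
    (fconn.foldl (fun (st : String × Int) group =>
        (group.foldl (fun s2 pair =>
            s2 ++ fmt8 (pair.getD 0 0 + st.2) ++ fmt8 (pair.getD 1 0 + st.2) ++ "\n") st.1,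
         st.2 + S)) (s, 0)).1
      = s ++ PySem.Str.join "" ((PySem.List.enumerate fconn 0).flatMap
          (fun gi => gi.2.map (fun pair =>
            fmt8 (pair.getD 0 0 + gi.1 * S) ++ fmt8 (pair.getD 1 0 + gi.1 * S) ++ "\n"))) := by
  have h := conn_eq fconn s 0 S
  rw [zero_mul] at h
  exact h

-- ===== VERDICT (by name: the statement is the Claim_ definition above) =====
theorem get_fragsection_spec : Claim_equal_get_fragsection := by
  intro param _hdom _hpre
  unfold Spec_get_fragsection
  obtain ⟨fa, fc, fcn, fconn, seg⟩ := param
  show get_fragsection (fa, fc, fcn, fconn, seg) = get_fragsection_alt (fa, fc, fcn, fconn, seg)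
  unfold get_fragsection get_fragsection_alt
  dsimp only
  rw [conn_eq0, seg_eq0, A_block_eq, A_block_eq, A_block_eq, String.empty_append]
  simp only [join_append, String.append_assoc]
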